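-- pv_equiv track=rewrite | github.com/zeinabdehghan/maze-game | main.py | lrta_star
-- ===== SOURCE A (Python) =====
-- def lrta_star(maze, xg, yg, xs, ys, max_iterations=1000):
--     size = len(maze)
--     start = (xs, ys)
--     goal = (xg, yg)
--
--     def get_neighbors(cell):
--         x, y = cell
--         neighbors = [(x + 1, y), (x - 1, y), (x, y + 1), (x, y - 1)]
--         return [(nx, ny) for nx, ny in neighbors if 0 <= nx < size and 0 <= ny < size and maze[nx][ny] == 0]
--
--     def heuristic(cell):
--         return abs(cell[0] - goal[0]) + abs(cell[1] - goal[1])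
--
--     def cost(current, next_cell):
--         return 1  # Cost of moving
--
--     def update_cost_to_go(cell):
--         return heuristic(cell)
--
--     def lrta_star_iteration(path, h_values):
--         current_cell = path[-1]
--         neighbors = get_neighbors(current_cell)
--
--         if not neighbors:
--             return None
--
--         min_h_value = float('inf')
--         best_neighbor = None
--
--         for neighbor in neighbors:
--             if h_values[neighbor] < min_h_value:
--                 min_h_value = h_values[neighbor]
--                 best_neighbor = neighbor
--
--         return best_neighbor
--
--     h_values = {(i, j): heuristic((i, j)) for i in range(size) for j in range(size)}
--     path = [start]
--
--     for _ in range(max_iterations):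
--         current_cell = path[-1]
--
--         if current_cell == goal:
--             return path
--
--         next_cell = lrta_star_iteration(path, h_values)
--
--         if next_cell is None:
--             break
--
--         path.append(next_cell)
--         h_values[next_cell] = update_cost_to_go(next_cell)
--
--     return None
-- ===== SOURCE B (Python) =====
-- def lrta_star(maze, xg, yg, xs, ys, max_iterations=1000):
--     # Lazy heuristic (no full-grid h_values precompute) + early cycle cut:
--     # A never actually updates h (update_cost_to_go == heuristic), so the walk is
--     # deterministic; revisiting a cell means the goal is unreachable -> None now.
--     size = len(maze)
--     goal = (xg, yg)
--     cur = (xs, ys)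
--     path = [cur]
--     visited = {cur}
--     steps = 0
--     while steps < max_iterations:
--         if cur == goal:
--             return path
--         x, y = cur
--         best = None
--         best_h = None
--         for nx, ny in ((x + 1, y), (x - 1, y), (x, y + 1), (x, y - 1)):
--             if 0 <= nx < size and 0 <= ny < size and maze[nx][ny] == 0:
--                 h = abs(nx - xg) + abs(ny - yg)
--                 if best_h is None or h < best_h:
--                     best_h = h
--                     best = (nx, ny)
--         if best is None:
--             return None
--         if best in visited:
--             return None
--         cur = best
--         path.append(cur)
--         visited.add(cur)
--         steps += 1
--     return None
-- ===== Notes on version B (the rewrite author's own statement) =====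
-- stated objective: faster
-- what changed: B drops A's full-grid h_values precomputation (A's 'update' re-writes the unchanged Manhattan heuristic, so h never changes) and computes the heuristic lazily per neighbor, and since the walk is therefore deterministic B keeps a visited set and returns None as soon as a cell repeats instead of burning the remaining iterations.
-- outside the precondition, e.g. on lrta_star([[1, 0], [1]], 0, 0, 5, 5, 3): A returns None, B returns None
import Mathlib
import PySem

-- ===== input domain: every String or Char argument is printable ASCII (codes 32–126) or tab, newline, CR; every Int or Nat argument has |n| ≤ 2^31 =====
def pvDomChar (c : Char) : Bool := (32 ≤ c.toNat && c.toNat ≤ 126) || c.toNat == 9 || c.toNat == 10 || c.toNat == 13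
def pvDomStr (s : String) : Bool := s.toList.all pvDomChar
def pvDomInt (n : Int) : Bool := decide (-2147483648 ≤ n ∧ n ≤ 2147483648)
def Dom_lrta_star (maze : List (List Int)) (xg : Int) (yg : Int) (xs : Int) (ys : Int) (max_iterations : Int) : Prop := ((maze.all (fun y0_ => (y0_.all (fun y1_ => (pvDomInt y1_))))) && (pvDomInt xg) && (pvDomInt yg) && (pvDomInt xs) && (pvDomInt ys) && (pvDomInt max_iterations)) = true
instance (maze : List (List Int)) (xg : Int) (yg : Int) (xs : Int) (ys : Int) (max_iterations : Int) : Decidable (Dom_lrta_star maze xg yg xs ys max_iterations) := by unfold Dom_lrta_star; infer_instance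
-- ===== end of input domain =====

-- B drops A's full-grid h_values precomputation (A never actually changes h) and, since the
-- greedy walk is therefore deterministic, cuts off via a visited set on the first repeated cell
-- (objective: faster). Equivalence is about the return value; neither program mutates its arguments.


-- ===== PORT A =====

-- heuristic(cell) = abs(cell[0]-goal[0]) + abs(cell[1]-goal[1])
def pvA_heur (xg yg : Int) (c : Int × Int) : Int := |c.1 - xg| + |c.2 - yg|

-- the comprehension filter of get_neighbors: 0 <= nx < size and 0 <= ny < size and maze[nx][ny] == 0
-- (maze[nx][ny] via pyGet?; under Pre_ (square maze) both lookups are in range, so `== some 0` is exact)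
def pvA_open (maze : List (List Int)) (size : Int) (n : Int × Int) : Bool :=
  decide (0 ≤ n.1) && decide (n.1 < size) && decide (0 ≤ n.2) && decide (n.2 < size) &&
    (((PySem.List.pyGet? maze n.1).bind (fun row => PySem.List.pyGet? row n.2)) == some 0)

def pvA_getNeighbors (maze : List (List Int)) (size : Int) (c : Int × Int) : List (Int × Int) :=
  [(c.1 + 1, c.2), (c.1 - 1, c.2), (c.1, c.2 + 1), (c.1, c.2 - 1)].filter (pvA_open maze size)

-- lrta_star_iteration: min_h = inf (encoded none), best = None, strict-< scan over neighbors
def pvA_iteration (maze : List (List Int)) (size : Int) (path : List (Int × Int))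
    (h : PySem.Dict (Int × Int) Int) : Option (Int × Int) :=
  match PySem.List.pyGet? path (-1) with
  | none => none   -- unreachable: path is never empty
  | some cur =>
    let neighbors := pvA_getNeighbors maze size cur
    if neighbors = [] then none
    else
      (neighbors.foldl (fun (acc : Option Int × Option (Int × Int)) n =>
          match acc.1 with
          | none => (some (h.getD n 0), some n)
          | some m => if h.getD n 0 < m then (some (h.getD n 0), some n) else acc)
        (none, none)).2

-- h_values = {(i, j): heuristic((i, j)) for i in range(size) for j in range(size)}
def pvA_initH (size xg yg : Int) : PySem.Dict (Int × Int) Int :=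
  (PySem.List.pyRange 0 size 1).foldl (fun d i =>
    (PySem.List.pyRange 0 size 1).foldl (fun d j => d.insert (i, j) (pvA_heur xg yg (i, j))) d)
    PySem.Dict.empty

-- for _ in range(max_iterations): …
def pvA_loop (maze : List (List Int)) (size xg yg : Int) (path : List (Int × Int))
    (h : PySem.Dict (Int × Int) Int) : Nat → Option (List (Int × Int))
  | 0 => none
  | fuel + 1 =>
    match PySem.List.pyGet? path (-1) with
    | none => none   -- unreachable: path is never empty
    | some cur =>
      if cur = (xg, yg) then some path
      else
        match pvA_iteration maze size path h with
        | none => none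
        | some nxt => pvA_loop maze size xg yg (path ++ [nxt]) (h.insert nxt (pvA_heur xg yg nxt)) fuel

def lrta_star (maze : List (List Int)) (xg : Int) (yg : Int) (xs : Int) (ys : Int) (max_iterations : Int) : Option (List (Int × Int)) :=
  pvA_loop maze maze.length xg yg [(xs, ys)] (pvA_initH maze.length xg yg) max_iterations.toNat

-- ===== PORT B =====

-- single fused scan over the four candidate moves, heuristic computed lazily
def pvB_bestNeighbor (maze : List (List Int)) (size xg yg x y : Int) : Option Int × Option (Int × Int) :=
  [(x + 1, y), (x - 1, y), (x, y + 1), (x, y - 1)].foldl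
    (fun (acc : Option Int × Option (Int × Int)) n =>
      if 0 ≤ n.1 ∧ n.1 < size ∧ 0 ≤ n.2 ∧ n.2 < size ∧
          ((PySem.List.pyGet? maze n.1).bind (fun row => PySem.List.pyGet? row n.2)) = some 0 then
        let hv := |n.1 - xg| + |n.2 - yg|
        match acc.1 with
        | none => (some hv, some n)
        | some m => if hv < m then (some hv, some n) else acc
      else acc)
    (none, none)

-- while steps < max_iterations: …  (cycle cut: a repeated cell means the goal is unreachable)
def pvB_loop (maze : List (List Int)) (size xg yg : Int) (cur : Int × Int) (path : List (Int × Int))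
    (visited : PySem.Set (Int × Int)) : Nat → Option (List (Int × Int))
  | 0 => none
  | fuel + 1 =>
    if cur = (xg, yg) then some path
    else
      match (pvB_bestNeighbor maze size xg yg cur.1 cur.2).2 with
      | none => none
      | some b =>
        if PySem.Set.contains visited b then none
        else pvB_loop maze size xg yg b (path ++ [b]) (PySem.Set.add visited b) fuel

def lrta_star_alt (maze : List (List Int)) (xg : Int) (yg : Int) (xs : Int) (ys : Int) (max_iterations : Int) : Option (List (Int × Int)) :=
  pvB_loop maze maze.length xg yg (xs, ys) [(xs, ys)] (PySem.Set.ofList [(xs, ys)]) max_iterations.toNat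

-- ===== PRECONDITION & SPEC =====
-- Pre_ excludes mazes with an IndexError hole (an in-grid column index past a short row's end)
-- adjacent to the start cell or to a readable zero cell: exactly the cells whose neighbors the
-- walk could ever probe, so on such inputs Python A's maze[nx][ny] may raise IndexError.
def Pre_lrta_star (maze : List (List Int)) (xg : Int) (yg : Int) (xs : Int) (ys : Int) (max_iterations : Int) : Prop :=
  max_iterations ≤ 0 ∨ (xs, ys) = (xg, yg) ∨
  ∀ i ∈ List.range maze.length, ∀ j ∈ List.range maze.length,
    (maze.getD i []).length ≤ j →
    ∀ n ∈ [((i : Int) + 1, (j : Int)), ((i : Int) - 1, (j : Int)),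
           ((i : Int), (j : Int) + 1), ((i : Int), (j : Int) - 1)],
      ¬ (n = (xs, ys) ∨ (0 ≤ n.1 ∧ 0 ≤ n.2 ∧ n.2 < (maze.length : Int) ∧
          ((PySem.List.pyGet? maze n.1).bind (fun row => PySem.List.pyGet? row n.2)) = some 0))
instance (maze : List (List Int)) (xg : Int) (yg : Int) (xs : Int) (ys : Int) (max_iterations : Int) : Decidable (Pre_lrta_star maze xg yg xs ys max_iterations) := by unfold Pre_lrta_star; infer_instance
def pvWitness_lrta_star : List (List Int) × Int × Int × Int × Int × Int := ([[0, 0], [0, 0]], 1, 1, 0, 0, 10)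

def Spec_lrta_star (maze : List (List Int)) (xg : Int) (yg : Int) (xs : Int) (ys : Int) (max_iterations : Int) (out : Option (List (Int × Int))) : Prop := out = lrta_star_alt maze xg yg xs ys max_iterations
instance (maze : List (List Int)) (xg : Int) (yg : Int) (xs : Int) (ys : Int) (max_iterations : Int) (out : Option (List (Int × Int))) : Decidable (Spec_lrta_star maze xg yg xs ys max_iterations out) := by unfold Spec_lrta_star; infer_instance

-- ===== CLAIM (what is proved, stated in full; the proofs are below) =====
def Claim_equal_lrta_star : Prop := ∀ (maze : List (List Int)) (xg : Int) (yg : Int) (xs : Int) (ys : Int) (max_iterations : Int), Dom_lrta_star maze xg yg xs ys max_iterations → Pre_lrta_star maze xg yg xs ys max_iterations → Spec_lrta_star maze xg yg xs ys max_iterations (lrta_star maze xg yg xs ys max_iterations)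

-- ===== LEMMAS AND PROOFS =====

-- h_values always carries exactly the heuristic on the in-grid cells
def pvGoodH (size xg yg : Int) (h : PySem.Dict (Int × Int) Int) : Prop :=
  ∀ n : Int × Int, 0 ≤ n.1 → n.1 < size → 0 ≤ n.2 → n.2 < size → h.getD n 0 = pvA_heur xg yg n

theorem pv_pyGet_neg_one (l : List (Int × Int)) : PySem.List.pyGet? l (-1) = l.getLast? := by
  simp [pysem]

theorem pv_getD_row (xg yg i : Int) (l : List Int) (d : PySem.Dict (Int × Int) Int) (c : Int × Int) :
    (l.foldl (fun d j => d.insert (i, j) (pvA_heur xg yg (i, j))) d).getD c 0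
      = if c.1 = i ∧ c.2 ∈ l then pvA_heur xg yg c else d.getD c 0 := by
  induction l generalizing d with
  | nil => simp
  | cons j t ih =>
    obtain ⟨cx, cy⟩ := c
    simp only [List.foldl_cons, ih, PySem.Dict.getD_insert]
    by_cases hin : cx = i ∧ cy ∈ t
    · rw [if_pos hin, if_pos ⟨hin.1, List.mem_cons_of_mem j hin.2⟩]
    · rw [if_neg hin]
      by_cases he : (cx, cy) = (i, j)
      · rw [Prod.mk.injEq] at he
        obtain ⟨rfl, rfl⟩ := he
        rw [if_pos rfl, if_pos ⟨rfl, List.mem_cons_self⟩]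
      · rw [if_neg he, if_neg]
        rintro ⟨rfl, hmem⟩
        rcases List.mem_cons.mp hmem with rfl | h2
        · exact he rfl
        · exact hin ⟨rfl, h2⟩

theorem pv_getD_grid (xg yg : Int) (l inner : List Int) (d : PySem.Dict (Int × Int) Int) (c : Int × Int) :
    (l.foldl (fun d i => inner.foldl (fun d j => d.insert (i, j) (pvA_heur xg yg (i, j))) d) d).getD c 0
      = if c.1 ∈ l ∧ c.2 ∈ inner then pvA_heur xg yg c else d.getD c 0 := by
  induction l generalizing d with
  | nil => simp
  | cons i t ih =>
    simp only [List.foldl_cons, ih, pv_getD_row]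
    by_cases hin : c.1 ∈ t ∧ c.2 ∈ inner
    · rw [if_pos hin, if_pos ⟨List.mem_cons_of_mem i hin.1, hin.2⟩]
    · rw [if_neg hin]
      by_cases he : c.1 = i ∧ c.2 ∈ inner
      · rw [if_pos he, if_pos ⟨he.1 ▸ List.mem_cons_self, he.2⟩]
      · rw [if_neg he, if_neg]
        rintro ⟨hmem, h2⟩
        rcases List.mem_cons.mp hmem with h1 | h1
        · exact he ⟨h1, h2⟩
        · exact hin ⟨h1, h2⟩

theorem pv_initH_good (size xg yg : Int) : pvGoodH size xg yg (pvA_initH size xg yg) := by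
  intro n h1 h2 h3 h4
  unfold pvA_initH
  rw [pv_getD_grid, if_pos ⟨PySem.List.mem_pyRange_one.mpr ⟨h1, h2⟩, PySem.List.mem_pyRange_one.mpr ⟨h3, h4⟩⟩]

theorem pv_goodH_insert (size xg yg : Int) (h : PySem.Dict (Int × Int) Int) (b : Int × Int)
    (hh : pvGoodH size xg yg h) : pvGoodH size xg yg (h.insert b (pvA_heur xg yg b)) := by
  intro n h1 h2 h3 h4
  rw [PySem.Dict.getD_insert]
  split
  · rename_i he; subst he; rfl
  · exact hh n h1 h2 h3 h4

-- A's neighbor selection equals B's fused selection (under the dict invariant)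
theorem pv_sel_eq (maze : List (List Int)) (size xg yg : Int) (path : List (Int × Int))
    (cur : Int × Int) (h : PySem.Dict (Int × Int) Int) (hh : pvGoodH size xg yg h)
    (hlast : PySem.List.pyGet? path (-1) = some cur) :
    pvA_iteration maze size path h = (pvB_bestNeighbor maze size xg yg cur.1 cur.2).2 := by
  have key : (pvA_getNeighbors maze size cur).foldl
      (fun (acc : Option Int × Option (Int × Int)) n =>
        match acc.1 with
        | none => (some (h.getD n 0), some n)
        | some m => if h.getD n 0 < m then (some (h.getD n 0), some n) else acc)
      (none, none) = pvB_bestNeighbor maze size xg yg cur.1 cur.2 := by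
    unfold pvA_getNeighbors pvB_bestNeighbor
    rw [List.foldl_filter]
    apply List.foldl_ext
    intro acc n _
    have hiff : pvA_open maze size n = true ↔
        (0 ≤ n.1 ∧ n.1 < size ∧ 0 ≤ n.2 ∧ n.2 < size ∧
          ((PySem.List.pyGet? maze n.1).bind (fun row => PySem.List.pyGet? row n.2)) = some 0) := by
      simp [pvA_open]; tauto
    by_cases hp : (0 ≤ n.1 ∧ n.1 < size ∧ 0 ≤ n.2 ∧ n.2 < size ∧
        ((PySem.List.pyGet? maze n.1).bind (fun row => PySem.List.pyGet? row n.2)) = some 0)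
    · rw [if_pos (hiff.mpr hp), if_pos hp]
      have hget : h.getD n 0 = |n.1 - xg| + |n.2 - yg| :=
        hh n hp.1 hp.2.1 hp.2.2.1 hp.2.2.2.1
      simp only [hget]
    · rw [if_neg (fun hx => hp (hiff.mp hx)), if_neg hp]
  unfold pvA_iteration
  rw [hlast]
  dsimp only
  rw [← key]
  by_cases hnil : pvA_getNeighbors maze size cur = []
  · rw [hnil]; rfl
  · rw [if_neg hnil]

-- A returns None forever once its current cell lies in a step-closed, goal-free set
theorem pv_trapped (maze : List (List Int)) (size xg yg : Int) (V : List (Int × Int))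
    (hV : ∀ c ∈ V, c ≠ (xg, yg) ∧
      ∀ b, (pvB_bestNeighbor maze size xg yg c.1 c.2).2 = some b → b ∈ V) :
    ∀ (fuel : Nat) (path : List (Int × Int)) (cur : Int × Int) (h : PySem.Dict (Int × Int) Int),
      pvGoodH size xg yg h → PySem.List.pyGet? path (-1) = some cur → cur ∈ V →
      pvA_loop maze size xg yg path h fuel = none := by
  intro fuel
  induction fuel with
  | zero => intro path cur h _ _ _; rfl
  | succ fuel ih =>
    intro path cur h hh hlast hcur
    obtain ⟨hng, hcl⟩ := hV cur hcur
    simp only [pvA_loop]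
    rw [hlast]
    dsimp only
    rw [if_neg hng, pv_sel_eq maze size xg yg path cur h hh hlast]
    cases heq : (pvB_bestNeighbor maze size xg yg cur.1 cur.2).2 with
    | none => rfl
    | some b =>
      exact ih (path ++ [b]) b _ (pv_goodH_insert size xg yg h b hh)
        (by rw [pv_pyGet_neg_one]; exact List.getLast?_concat) (hcl b heq)

-- along a deterministic chain, the successor of any non-last element stays in the chain
theorem pv_chain_next {f : (Int × Int) → Option (Int × Int)} :
    ∀ (l : List (Int × Int)) (c b cur : Int × Int),
      List.IsChain (fun a b => f a = some b) l → l.getLast? = some cur → c ∈ l → c ≠ cur →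
      f c = some b → b ∈ l := by
  intro l
  induction l with
  | nil => intro c b cur _ _ hc; simp at hc
  | cons a t ih =>
    intro c b cur hch hlast hc hne hf
    cases t with
    | nil =>
      simp at hc hlast
      exact absurd (hc.trans hlast) hne
    | cons a2 t2 =>
      rw [List.isChain_cons_cons] at hch
      rcases List.mem_cons.mp hc with rfl | hc2
      · have : b = a2 := by rw [hch.1] at hf; exact (Option.some.injEq .. ▸ hf).symm
        subst this
        exact List.mem_cons_of_mem _ List.mem_cons_self
      · rw [List.getLast?_cons_cons] at hlast
        exact List.mem_cons_of_mem _ (ih c b cur hch.2 hlast hc2 hne hf)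

theorem pv_main (maze : List (List Int)) (size xg yg : Int) :
    ∀ (fuel : Nat) (path : List (Int × Int)) (cur : Int × Int)
      (h : PySem.Dict (Int × Int) Int) (visited : PySem.Set (Int × Int)),
      pvGoodH size xg yg h →
      PySem.List.pyGet? path (-1) = some cur →
      (∀ c : Int × Int, c ∈ visited ↔ c ∈ path) →
      List.IsChain (fun a b => (pvB_bestNeighbor maze size xg yg a.1 a.2).2 = some b) path →
      (∀ c ∈ path, c ≠ cur → c ≠ (xg, yg)) →
      pvA_loop maze size xg yg path h fuel = pvB_loop maze size xg yg cur path visited fuel := by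
  intro fuel
  induction fuel with
  | zero => intro path cur h visited _ _ _ _ _; rfl
  | succ fuel ih =>
    intro path cur h visited hh hlast hvis hch hng
    simp only [pvA_loop, pvB_loop]
    rw [hlast]
    dsimp only
    by_cases hg : cur = (xg, yg)
    · rw [if_pos hg, if_pos hg]
    · rw [if_neg hg, if_neg hg, pv_sel_eq maze size xg yg path cur h hh hlast]
      cases heq : (pvB_bestNeighbor maze size xg yg cur.1 cur.2).2 with
      | none => rfl
      | some b =>
        have hlast' : (path ++ [b]).getLast? = some b := List.getLast?_concat
        have hcurlast : path.getLast? = some cur := by rw [← pv_pyGet_neg_one]; exact hlast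
        dsimp only
        by_cases hb : b ∈ path
        · rw [if_pos ((PySem.Set.contains_iff visited b).mpr ((hvis b).mpr hb))]
          apply pv_trapped maze size xg yg path _ fuel (path ++ [b]) b _
            (pv_goodH_insert size xg yg h b hh)
            (by rw [pv_pyGet_neg_one]; exact hlast') hb
          intro c hc
          constructor
          · by_cases hcc : c = cur
            · subst hcc; exact hg
            · exact hng c hc hcc
          · intro b2 hf
            by_cases hcc : c = cur
            · subst hcc
              rw [heq] at hf
              injection hf with h2
              rwa [← h2]
            · exact pv_chain_next path c b2 cur hch hcurlast hc hcc hf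
        · rw [if_neg (by
            intro hcont
            exact hb ((hvis b).mp ((PySem.Set.contains_iff visited b).mp hcont)))]
          apply ih (path ++ [b]) b _ (PySem.Set.add visited b)
            (pv_goodH_insert size xg yg h b hh)
            (by rw [pv_pyGet_neg_one]; exact hlast')
          · intro c
            rw [PySem.Set.mem_add, hvis c, List.mem_append, List.mem_singleton]
          · rw [List.isChain_append]
            refine ⟨hch, by simp, ?_⟩
            intro x hx y hy
            rw [hcurlast] at hx
            simp at hx hy
            rw [← hx, ← hy]
            exact heq
          · intro c hc hne
            rcases List.mem_append.mp hc with h1 | h1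
            · by_cases hcc : c = cur
              · subst hcc; exact hg
              · exact hng c h1 hcc
            · exact absurd (List.mem_singleton.mp h1) hne

-- ===== VERDICT (by name: the statement is the Claim_ definition above) =====
theorem lrta_star_spec : Claim_equal_lrta_star := by
  intro maze xg yg xs ys max_iterations _ _
  unfold Spec_lrta_star lrta_star lrta_star_alt
  apply pv_main
  · exact pv_initH_good _ _ _
  · rw [pv_pyGet_neg_one]; rfl
  · intro c; rw [PySem.Set.mem_ofList]
  · simp
  · intro c hc hne; simp at hc; exact absurd hc hne
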